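-- pv_equiv track=rewrite | github.com/dfout/Recommendation-Algorithms | project2Phase3a.py | make_rLu
-- ===== SOURCE A (Python) =====
-- def make_rLu(ratingTuples, numUsers):
--     rLu = []
--     l = list(range(numUsers + 1))
--     l.pop(0)
--     for x in l:
--     # a dictionary per user
--         dict = {}
--         for values in ratingTuples:
--             if values[0] != x:
--                break
--             dict[values[1]] = values[2]
--         rLu.append(dict)
--         ratingTuples = ratingTuples[(ratingTuples.index(values)):]
--     return rLu
-- ===== SOURCE B (Python) =====
-- # Two staged linear passes: first split the tuples once into maximal consecutive runs
-- # (user, {item: rating}), then align that run list with users 1..numUsers; no slicing, no list.index.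
-- def make_rLu(ratingTuples, numUsers):
--     # Phase 1: one cursor pass splitting the list into maximal consecutive runs.
--     runs = []
--     k, n = 0, len(ratingTuples)
--     while k < n:
--         u = ratingTuples[k][0]
--         d = {}
--         while k < n and ratingTuples[k][0] == u:
--             d[ratingTuples[k][1]] = ratingTuples[k][2]
--             k += 1
--         runs.append((u, d))
--     # Phase 2: match the run sequence against users 1..numUsers; a user whose id is not
--     # the next run's id gets an empty dict and the run cursor stays put.
--     out = []
--     j = 0
--     for x in range(1, numUsers + 1):
--         if j < len(runs) and runs[j][0] == x:
--             out.append(runs[j][1])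
--             j += 1
--         else:
--             out.append({})
--     return out
-- ===== Notes on version B (the rewrite author's own statement) =====
-- stated objective: faster
-- what changed: B replaces A's interleaved per-user rescan with list.index plus list slicing (which copies the remaining tuples every iteration) by two staged linear passes: one cursor pass splitting the tuples into maximal consecutive (user, dict) runs, then an alignment pass matching that run list against users 1..numUsers.
import Mathlib
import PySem

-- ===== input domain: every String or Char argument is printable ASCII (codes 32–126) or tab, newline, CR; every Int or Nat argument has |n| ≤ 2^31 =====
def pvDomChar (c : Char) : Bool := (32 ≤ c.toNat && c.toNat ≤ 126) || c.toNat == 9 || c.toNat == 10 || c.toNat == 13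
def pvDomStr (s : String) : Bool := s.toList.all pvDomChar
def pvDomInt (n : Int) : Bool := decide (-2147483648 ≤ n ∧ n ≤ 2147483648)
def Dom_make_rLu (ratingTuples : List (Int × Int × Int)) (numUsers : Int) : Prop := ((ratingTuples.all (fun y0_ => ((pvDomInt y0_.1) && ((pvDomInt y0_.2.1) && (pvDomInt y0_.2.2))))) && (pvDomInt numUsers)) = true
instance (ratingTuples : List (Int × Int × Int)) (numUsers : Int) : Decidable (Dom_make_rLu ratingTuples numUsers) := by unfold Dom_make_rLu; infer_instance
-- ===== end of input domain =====

-- B replaces A's interleaved list.index + slicing rescans by two staged linear passes: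
-- split the tuples into maximal consecutive (user, dict) runs, then align the runs with
-- users 1..numUsers (objective: faster).


-- ===== PORT A =====
-- inner 'for values in ratingTuples: if values[0] != x: break; dict[values[1]] = values[2]'
-- returns (dict, last value taken by the loop variable 'values'; the carried Option is the
-- possibly-unbound 'values' from before the loop — 'none' = Python's UnboundLocalError)
def pvInnerA (x : Int) : List (Int × Int × Int) → PySem.Dict Int Int → Option (Int × Int × Int) → PySem.Dict Int Int × Option (Int × Int × Int)
  | [], d, v => (d, v)
  | t :: rest, d, _ =>
      if t.1 ≠ x then (d, some t)
      else pvInnerA x rest (d.insert t.2.1 t.2.2) (some t)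

-- outer 'for x in l', carrying (ratingTuples, rLu, values)
def pvOuterA : List Int → List (Int × Int × Int) → List (PySem.Dict Int Int) → Option (Int × Int × Int) → List (PySem.Dict Int Int)
  | [], _, rLu, _ => rLu
  | x :: xs, L, rLu, v =>
      let r := pvInnerA x L PySem.Dict.empty v
      let L' := match r.2 with
        | none => L        -- Python: UnboundLocalError (excluded by Pre_)
        | some t => match PySem.List.index? L t with
          | none => L      -- Python: ValueError (unreachable under Pre_)
          | some k => PySem.List.slice L (some (k : Int)) none
      pvOuterA xs L' (rLu ++ [r.1]) r.2

def make_rLu (ratingTuples : List (Int × Int × Int)) (numUsers : Int) : List (List (Int × Int)) :=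
  match PySem.List.pop? (PySem.List.pyRange 0 (numUsers + 1) 1) 0 with
  | none => []               -- Python: IndexError on l.pop(0) (excluded by Pre_)
  | some (_, l') => (pvOuterA l' ratingTuples [] none).map (fun d => d.items)

-- ===== PORT B =====
-- phase 1, inner 'while k < n and ratingTuples[k][0] == u' (cursor k = the unread suffix):
-- consumes the current run, returns (its dict, the unread suffix)
def pvWhileRun (u : Int) : List (Int × Int × Int) → PySem.Dict Int Int → PySem.Dict Int Int × List (Int × Int × Int)
  | [], d => (d, [])
  | t :: rest, d =>
      if t.1 = u then pvWhileRun u rest (d.insert t.2.1 t.2.2)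
      else (d, t :: rest)

-- the unread suffix never grows (termination of the outer while)
lemma pvWhileRun_len (u : Int) : ∀ (L : List (Int × Int × Int)) (d : PySem.Dict Int Int),
    (pvWhileRun u L d).2.length ≤ L.length := by
  intro L
  induction L with
  | nil => intro d; simp [pvWhileRun]
  | cons t rest ih =>
      intro d
      by_cases h : t.1 = u
      · simp only [pvWhileRun, if_pos h]
        exact le_trans (ih _) (Nat.le_succ _)
      · simp [pvWhileRun, h]

-- phase 1, outer 'while k < n': split the list into maximal consecutive (user, dict) runs
def pvSplitRuns : List (Int × Int × Int) → List (Int × PySem.Dict Int Int)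
  | [] => []
  | t :: ts =>
      (t.1, (pvWhileRun t.1 (t :: ts) PySem.Dict.empty).1) ::
        pvSplitRuns (pvWhileRun t.1 (t :: ts) PySem.Dict.empty).2
  termination_by L => L.length
  decreasing_by
    simp only [pvWhileRun]
    exact Nat.lt_succ_of_le (pvWhileRun_len _ _ _)

-- phase 2, 'for x in range(1, numUsers+1)' with run cursor j (= the unmatched run suffix)
def pvAlign : List Int → List (Int × PySem.Dict Int Int) → List (PySem.Dict Int Int) → List (PySem.Dict Int Int)
  | [], _, out => out
  | _ :: xs, [], out => pvAlign xs [] (out ++ [PySem.Dict.empty])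
  | x :: xs, r :: rs, out =>
      if r.1 = x then pvAlign xs rs (out ++ [r.2])
      else pvAlign xs (r :: rs) (out ++ [PySem.Dict.empty])

def make_rLu_alt (ratingTuples : List (Int × Int × Int)) (numUsers : Int) : List (List (Int × Int)) :=
  (pvAlign (PySem.List.pyRange 1 (numUsers + 1) 1) (pvSplitRuns ratingTuples) []).map (fun d => d.items)

-- ===== PRECONDITION & SPEC =====
-- Pre_ excludes exactly the inputs where A raises: numUsers < 0 (IndexError on pop from the
-- empty range) and numUsers ≥ 1 with an empty tuple list (UnboundLocalError on 'values').
def Pre_make_rLu (ratingTuples : List (Int × Int × Int)) (numUsers : Int) : Prop :=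
  0 ≤ numUsers ∧ (numUsers = 0 ∨ ratingTuples ≠ [])
instance (ratingTuples : List (Int × Int × Int)) (numUsers : Int) : Decidable (Pre_make_rLu ratingTuples numUsers) := by unfold Pre_make_rLu; infer_instance
def pvWitness_make_rLu : (List (Int × Int × Int)) × Int := ([(1, 2, 3), (2, 4, 5)], 2)

def Spec_make_rLu (ratingTuples : List (Int × Int × Int)) (numUsers : Int) (out : List (List (Int × Int))) : Prop := out = make_rLu_alt ratingTuples numUsers
instance (ratingTuples : List (Int × Int × Int)) (numUsers : Int) (out : List (List (Int × Int))) : Decidable (Spec_make_rLu ratingTuples numUsers out) := by unfold Spec_make_rLu; infer_instance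

-- ===== CLAIM (what is proved, stated in full; the proofs are below) =====
def Claim_equal_make_rLu : Prop := ∀ (ratingTuples : List (Int × Int × Int)) (numUsers : Int), Dom_make_rLu ratingTuples numUsers → Pre_make_rLu ratingTuples numUsers → Spec_make_rLu ratingTuples numUsers (make_rLu ratingTuples numUsers)

-- ===== LEMMAS AND PROOFS =====

-- B's run-consuming while computed as takeWhile/dropWhile
lemma whileRun_eq (u : Int) : ∀ (L : List (Int × Int × Int)) (d : PySem.Dict Int Int),
    pvWhileRun u L d =
      ((L.takeWhile (fun t => t.1 == u)).foldl (fun d t => d.insert t.2.1 t.2.2) d,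
       L.dropWhile (fun t => t.1 == u)) := by
  intro L
  induction L with
  | nil => intro d; rfl
  | cons t rest ih =>
      intro d
      by_cases h : t.1 = u
      · simp [pvWhileRun, h, ih]
      · simp [pvWhileRun, h]

lemma splitRuns_nil : pvSplitRuns [] = [] := by simp [pvSplitRuns]

lemma splitRuns_cons (t : Int × Int × Int) (ts : List (Int × Int × Int)) :
    pvSplitRuns (t :: ts) =
      (t.1, ((t :: ts).takeWhile (fun s => s.1 == t.1)).foldl (fun d s => d.insert s.2.1 s.2.2) PySem.Dict.empty) ::
        pvSplitRuns ((t :: ts).dropWhile (fun s => s.1 == t.1)) := by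
  rw [pvSplitRuns, whileRun_eq]

-- A's inner loop on a nonempty list: same dict as B's run; 'values' ends on the head of the
-- unread rest, or on the last element when the whole list is read
lemma innerA_eq (x : Int) : ∀ (L : List (Int × Int × Int)) (d : PySem.Dict Int Int) (v : Option (Int × Int × Int)) (hL : L ≠ []),
    pvInnerA x L d v =
      ((L.takeWhile (fun t => t.1 == x)).foldl (fun d t => d.insert t.2.1 t.2.2) d,
       some (match L.dropWhile (fun t => t.1 == x) with
             | t :: _ => t
             | [] => L.getLast hL)) := by
  intro L
  induction L with
  | nil => intro _ _ h; exact absurd rfl h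
  | cons t rest ih =>
      intro d v _
      by_cases h : t.1 = x
      · rcases Decidable.em (rest = []) with hr | hr
        · subst hr; simp [pvInnerA, h]
        · have step : pvInnerA x (t :: rest) d v = pvInnerA x rest (d.insert t.2.1 t.2.2) (some t) := by
            simp [pvInnerA, h]
          rw [step, ih (d.insert t.2.1 t.2.2) (some t) hr]
          cases hdw : rest.dropWhile (fun u => u.1 == x) with
          | cons a as => simp [h, hdw]
          | nil => simp [h, hdw, List.getLast_cons hr]
      · simp [pvInnerA, h]

-- elements of the takeWhile prefix satisfy the scanned predicate
lemma mem_takeWhile_fst (x : Int) {t : Int × Int × Int} {L : List (Int × Int × Int)}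
    (h : t ∈ L.takeWhile (fun u => u.1 == x)) : t.1 = x := by
  have := List.mem_takeWhile_imp h
  simpa using this

-- main loop equivalence: either B's run list is exactly the runs of A's remaining tuples, or
-- B's runs are exhausted and every tuple A still holds belongs to no user yet to come
lemma align_outer : ∀ (xs : List Int), xs.Nodup →
    ∀ (LA : List (Int × Int × Int)) (R : List (Int × PySem.Dict Int Int))
      (acc : List (PySem.Dict Int Int)) (v : Option (Int × Int × Int)),
    ((R = pvSplitRuns LA ∧ LA ≠ []) ∨ (R = [] ∧ LA ≠ [] ∧ ∀ t ∈ LA, t.1 ∉ xs)) →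
    pvOuterA xs LA acc v = pvAlign xs R acc := by
  intro xs
  induction xs with
  | nil =>
      intro _ _ R _ _ hinv
      rcases hinv with ⟨rfl, _⟩ | ⟨rfl, _, _⟩ <;> rfl
  | cons x xs ih =>
      intro hnd LA R acc v hinv
      have hndx : x ∉ xs := (List.nodup_cons.mp hnd).1
      have hnd' : xs.Nodup := (List.nodup_cons.mp hnd).2
      rcases hinv with ⟨rfl, hne⟩ | ⟨rfl, hne, hout⟩
      · cases LA with
        | nil => exact absurd rfl hne
        | cons t ts =>
          by_cases hx : t.1 = x
          · subst hx
            rw [splitRuns_cons]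
            simp only [pvOuterA, pvAlign, innerA_eq t.1 (t :: ts) PySem.Dict.empty v hne]
            cases hR : (t :: ts).dropWhile (fun s => s.1 == t.1) with
            | cons r R' =>
                set P := (t :: ts).takeWhile (fun s => s.1 == t.1) with hP
                have hsplit : P ++ r :: R' = t :: ts := by
                  rw [hP, ← hR]; exact List.takeWhile_append_dropWhile
                have hrx : r.1 ≠ t.1 := by
                  have := List.head?_dropWhile_not (fun s => s.1 == t.1) (t :: ts)
                  rw [hR] at this; simpa using this
                have hidx : PySem.List.index? (t :: ts) r = some P.length := by
                  rw [PySem.List.index?_eq_some_iff]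
                  exact ⟨_, R', hsplit.symm, rfl, fun hmem => hrx (mem_takeWhile_fst t.1 (hP ▸ hmem))⟩
                have hdrop : PySem.List.slice (t :: ts) (some ((P.length : Nat) : Int)) none = r :: R' := by
                  rw [PySem.List.slice_from_natCast, ← hsplit]
                  exact List.drop_left
                simp only [hidx, hdrop]
                exact ih hnd' _ _ _ _ (Or.inl ⟨rfl, by simp⟩)
            | nil =>
                have hall : ∀ s ∈ t :: ts, s.1 = t.1 := by
                  intro s hs
                  have htw : (t :: ts).takeWhile (fun u => u.1 == t.1) = t :: ts := by
                    have h2 := List.takeWhile_append_dropWhile (p := fun s : Int × Int × Int => s.1 == t.1) (l := t :: ts)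
                    rw [hR] at h2; simpa using h2
                  exact mem_takeWhile_fst t.1 (htw ▸ hs)
                set g := (t :: ts).getLast hne with hg
                have hlast : g ∈ t :: ts := List.getLast_mem hne
                obtain ⟨k, hk⟩ : ∃ k, PySem.List.index? (t :: ts) g = some k := by
                  have := (PySem.List.index?_isSome_iff (xs := t :: ts) (v := g)).mpr hlast
                  exact Option.isSome_iff_exists.mp this
                obtain ⟨pre, suf, hps, hlen, _⟩ := (PySem.List.index?_eq_some_iff _ _ _).mp hk
                have hdrop : PySem.List.slice (t :: ts) (some ((k : Nat) : Int)) none = g :: suf := by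
                  rw [PySem.List.slice_from_natCast, hps, ← hlen]
                  exact List.drop_left
                simp only [hk, hdrop, splitRuns_nil]
                refine ih hnd' _ _ _ _ (Or.inr ⟨rfl, by simp, ?_⟩)
                intro s hs hmem
                have hsLA : s ∈ t :: ts := by rw [hps]; exact List.mem_append_right _ hs
                exact hndx (hall s hsLA ▸ hmem)
          · rw [splitRuns_cons]
            have hdrop : PySem.List.slice (t :: ts) (some (((0 : Nat) : Int))) none = t :: ts := by
              rw [PySem.List.slice_from_natCast]; exact List.drop_zero
            simp only [pvOuterA, pvAlign, pvInnerA, if_pos hx, if_neg hx,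
              PySem.List.index?_cons_self, hdrop]
            rw [← splitRuns_cons]
            exact ih hnd' _ _ _ _ (Or.inl ⟨rfl, by simp⟩)
      · cases LA with
        | nil => exact absurd rfl hne
        | cons u rest =>
            have hux : u.1 ≠ x := by
              intro h; exact (hout u (by simp)) (h ▸ List.mem_cons_self)
            have hdrop : PySem.List.slice (u :: rest) (some (((0 : Nat) : Int))) none = u :: rest := by
              rw [PySem.List.slice_from_natCast]; exact List.drop_zero
            simp only [pvOuterA, pvAlign, pvInnerA, if_pos hux,
              PySem.List.index?_cons_self, hdrop]
            exact ih hnd' _ _ _ _ (Or.inr ⟨rfl, by simp,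
              fun s hs hm => hout s hs (List.mem_cons_of_mem _ hm)⟩)

-- ===== VERDICT (by name: the statement is the Claim_ definition above) =====
theorem make_rLu_spec : Claim_equal_make_rLu := by
  intro rt nu _ hpre
  obtain ⟨hnn, hcase⟩ := hpre
  unfold Spec_make_rLu make_rLu make_rLu_alt
  have hcons : PySem.List.pyRange 0 (nu + 1) 1 = 0 :: PySem.List.pyRange 1 (nu + 1) 1 :=
    PySem.List.pyRange_one_cons (by omega)
  rw [hcons, PySem.List.pop?_zero_cons]
  rcases hcase with h0 | hne
  · subst h0
    rw [PySem.List.pyRange_one_eq_nil (by omega)]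
    rfl
  · show List.map (fun d => d.items) (pvOuterA (PySem.List.pyRange 1 (nu + 1) 1) rt [] none) =
        List.map (fun d => d.items) (pvAlign (PySem.List.pyRange 1 (nu + 1) 1) (pvSplitRuns rt) [])
    rw [align_outer _ (PySem.List.nodup_pyRange_one _ _) rt (pvSplitRuns rt) [] none (Or.inl ⟨rfl, hne⟩)]
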